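-- pv_equiv track=rewrite | github.com/mcandocia/bispline-modeling | tools.py | degree_derivative_iter_max
-- ===== SOURCE A (Python) =====
-- import itertools
--
-- def degree_derivative_iter_max(k, v=['y','x'],sep='',sep2=''):
--     # choose all combinations where max <= k
--     # e.g., x0y0
--     # x1y0
--     # x1y1z1
--     n = len(v)
--     vrange = list(range(k+1))
--     combos = list(itertools.combinations_with_replacement(vrange,n))
--     res = [
--         sep.join(
--             ['%s%s%s' % (v[i], sep2,c[i])  for i in range(len(c))]
--         ) for c in combos
--     ]
--     return res
-- ===== SOURCE B (Python) =====
-- def degree_derivative_iter_max(k, v=['y','x'], sep='', sep2=''):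
--     # Depth-first enumeration of the non-decreasing degree tuples with an explicit
--     # stack (no itertools, no recursion). Each chosen value is formatted once per
--     # tree node ('name' + sep2 + value) and shared by the whole subtree through a
--     # cons chain, and the last level is emitted by a direct inner loop, so no
--     # per-tuple index formatting or tuple list is ever materialised.
--     n = len(v)
--     res = []
--     pieces = ['%s%s' % (name, sep2) for name in v]
--     stack = [(n, 0, None)]  # (slots left, next candidate value, chain of formatted choices, newest first)
--     pop = stack.pop
--     push = stack.append
--     append = res.append
--     while stack:
--         r, lo, chain = pop()
--         if r == 0:
--             parts = []
--             while chain is not None: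
--                 parts.append(chain[0])
--                 chain = chain[1]
--             parts.reverse()
--             append(sep.join(parts))
--         elif r == 1:
--             parts = []
--             while chain is not None:
--                 parts.append(chain[0])
--                 chain = chain[1]
--             parts.reverse()
--             head = sep.join(parts) + sep if parts else ''
--             last = pieces[n - 1]
--             for val in range(lo, k + 1):
--                 append(head + last + str(val))
--         elif lo <= k:
--             push((r, lo + 1, chain))                                   # resume this level at the next value
--             push((r - 1, lo, (pieces[n - r] + str(lo), chain)))        # descend, choosing lo
--     return res
-- ===== Notes on version B (the rewrite author's own statement) =====
-- stated objective: alternative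
-- what changed: B replaces itertools.combinations_with_replacement plus a separate index-based formatting comprehension by an explicit-stack depth-first enumeration that formats each chosen value once per tree node (shared by the whole subtree via a cons chain) and emits the last level in a direct inner loop, never materialising the tuple list.
import Mathlib
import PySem

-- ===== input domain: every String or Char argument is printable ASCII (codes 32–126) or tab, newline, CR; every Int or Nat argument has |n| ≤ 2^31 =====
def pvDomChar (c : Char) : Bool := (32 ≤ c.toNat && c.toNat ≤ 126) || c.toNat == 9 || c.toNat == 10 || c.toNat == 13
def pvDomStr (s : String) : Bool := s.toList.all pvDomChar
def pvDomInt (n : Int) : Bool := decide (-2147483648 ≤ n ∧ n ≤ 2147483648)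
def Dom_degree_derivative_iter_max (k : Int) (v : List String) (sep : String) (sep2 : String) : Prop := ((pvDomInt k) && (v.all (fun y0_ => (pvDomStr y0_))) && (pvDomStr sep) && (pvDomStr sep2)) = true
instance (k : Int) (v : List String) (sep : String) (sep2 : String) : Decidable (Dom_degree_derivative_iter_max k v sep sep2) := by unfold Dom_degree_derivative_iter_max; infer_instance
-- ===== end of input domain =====

-- B enumerates the non-decreasing tuples depth-first with an explicit stack, formatting each
-- chosen value once per tree node and sharing it via a cons chain, with a direct inner loop for
-- the last level, instead of materialising itertools.combinations_with_replacement and then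
-- formatting every tuple by index.

-- ===== PORT A =====
-- hand port of itertools.combinations_with_replacement(pool, r) (as lists, CPython's
-- lexicographic order); exact: PySem has no primitive for it
def pvCwr : List Int → Nat → List (List Int)
  | _, 0 => [[]]
  | [], _ + 1 => []
  | x :: rest, r + 1 => ((pvCwr (x :: rest) r).map (x :: ·)) ++ pvCwr rest (r + 1)
  termination_by pool r => (r, pool.length)

def degree_derivative_iter_max (k : Int) (v : List String) (sep : String) (sep2 : String) : List String :=
  let n := v.length
  let vrange := PySem.List.pyRange 0 (k + 1) 1
  let combos := pvCwr vrange n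
  combos.map (fun c =>
    PySem.Str.join sep ((List.range c.length).map (fun (i : Nat) =>
      ((PySem.List.pyGet? v (i : Int)).getD "" ++ sep2) ++
        PySem.Int.toStr ((PySem.List.pyGet? c (i : Int)).getD 0))))

-- ===== PORT B =====
-- stack entry (r, lo, chain): r slots left to fill, lo the next candidate value, chain the
-- already-formatted chosen pieces, newest first (Python's (piece, chain) cons pairs are a
-- List String; the chain-unwinding while loop followed by parts.reverse() is chain.reverse)
def pvWeight (k : Int) (e : Nat × Int × List String) : Nat := ((k + 1 - e.2.1).toNat + 1) ^ (e.1 + 1)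

def pvLoop (k : Int) (v : List String) (sep sep2 : String) (pieces : List String) :
    List (Nat × Int × List String) → List String → List String
  | [], res => res
  | (0, _, chain) :: rest, res =>
      pvLoop k v sep sep2 pieces rest (res ++ [PySem.Str.join sep chain.reverse])
  | (1, lo, chain) :: rest, res =>
      -- last level: emit all leaves of this node directly
      let parts := chain.reverse
      let head := if parts.isEmpty then "" else PySem.Str.join sep parts ++ sep
      let last := PySem.List.pyGetD pieces ((v.length : Int) - 1) ""
      pvLoop k v sep sep2 pieces rest
        (res ++ (PySem.List.pyRange lo (k + 1) 1).map (fun val => head ++ last ++ PySem.Int.toStr val))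
  | (r + 2, lo, chain) :: rest, res =>
      if lo ≤ k then
        -- Python pushes the resumption then the child; the child is popped first, so it is the
        -- head of the stack list here
        pvLoop k v sep sep2 pieces
          ((r + 1, lo, (PySem.List.pyGetD pieces ((v.length : Int) - (r + 2)) "" ++ PySem.Int.toStr lo) :: chain)
            :: (r + 2, lo + 1, chain) :: rest) res
      else
        pvLoop k v sep sep2 pieces rest res
  termination_by stack _ => (stack.map (pvWeight k)).sum
  decreasing_by
  · simp [pvWeight]
  · simp [pvWeight]
  · simp only [List.map_cons, List.sum_cons, pvWeight]
    have hm : 1 ≤ (k + 1 - lo).toNat := by omega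
    have h2 : (k + 1 - (lo + 1)).toNat + 1 = (k + 1 - lo).toNat := by omega
    set m : Nat := (k + 1 - lo).toNat
    rw [h2]
    -- need (m+1)^(r+2) + m^(r+3) < (m+1)^(r+3)
    have hp : m ^ (r + 2) < (m + 1) ^ (r + 2) := Nat.pow_lt_pow_left (by omega) (by omega)
    have h3 : m * m ^ (r + 2) < m * (m + 1) ^ (r + 2) := by nlinarith
    have e1 : m ^ (r + 2 + 1) = m * m ^ (r + 2) := by ring
    have e2 : (m + 1) ^ (r + 2 + 1) = (m + 1) ^ (r + 2) + m * (m + 1) ^ (r + 2) := by ring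
    have e3 : (m + 1) ^ (r + 1 + 1) = (m + 1) ^ (r + 2) := rfl
    have e4 : (m + 1) ^ (r + 1 + 1 + 1) = (m + 1) ^ (r + 2 + 1) := rfl
    simp only [Nat.succ_eq_add_one]
    omega
  · simp only [List.map_cons, List.sum_cons, pvWeight, Nat.succ_eq_add_one]
    simp only [show r + 1 + 1 = r + 2 from by omega]
    have : 0 < ((k + 1 - lo).toNat + 1) ^ (r + 2 + 1) := Nat.pow_pos (by omega)
    omega

def degree_derivative_iter_max_alt (k : Int) (v : List String) (sep : String) (sep2 : String) : List String :=
  pvLoop k v sep sep2 (v.map (fun name => name ++ sep2)) [(v.length, 0, [])] []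

-- ===== PRECONDITION & SPEC =====
def Spec_degree_derivative_iter_max (k : Int) (v : List String) (sep : String) (sep2 : String) (out : List String) : Prop := out = degree_derivative_iter_max_alt k v sep sep2
instance (k : Int) (v : List String) (sep : String) (sep2 : String) (out : List String) : Decidable (Spec_degree_derivative_iter_max k v sep sep2 out) := by unfold Spec_degree_derivative_iter_max; infer_instance

-- ===== CLAIM (what is proved, stated in full; the proofs are below) =====
def Claim_equal_degree_derivative_iter_max : Prop := ∀ (k : Int) (v : List String) (sep : String) (sep2 : String), Dom_degree_derivative_iter_max k v sep sep2 → Spec_degree_derivative_iter_max k v sep sep2 (degree_derivative_iter_max k v sep sep2)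

-- ===== LEMMAS AND PROOFS =====

-- every tuple produced by pvCwr has exactly r entries
lemma pvCwr_length : ∀ (pool : List Int) (r : Nat) (c : List Int), c ∈ pvCwr pool r → c.length = r := by
  intro pool r
  induction pool, r using pvCwr.induct with
  | case1 pool => intro c hc; simp [pvCwr] at hc; simp [hc]
  | case2 r => intro c hc; simp [pvCwr] at hc
  | case3 x rest r ih1 ih2 =>
      intro c hc
      simp only [pvCwr, List.mem_append, List.mem_map] at hc
      rcases hc with ⟨d, hd, rfl⟩ | hc
      · simp [ih1 d hd]
      · exact ih2 c hc

lemma pvCwr_one : ∀ (pool : List Int), pvCwr pool 1 = pool.map (fun x => [x]) := by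
  intro pool
  induction pool with
  | nil => rw [pvCwr]; rfl
  | cons x rest ih =>
      rw [pvCwr, ih, show pvCwr (x :: rest) 0 = [[]] from by rw [pvCwr]]
      rfl

-- sep.join(xs + [y]) peels off the last element
lemma chars_join_append_singleton (s y : List Char) :
    ∀ (xs : List (List Char)),
      PySem.Chars.join s (xs ++ [y]) = (if xs = [] then [] else PySem.Chars.join s xs ++ s) ++ y := by
  intro xs
  induction xs with
  | nil => simp [PySem.Chars.join_singleton]
  | cons x xs' ih =>
      cases xs' with
      | nil => simp [PySem.Chars.join_cons_cons, PySem.Chars.join_singleton]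
      | cons x' xs'' =>
          simp only [List.cons_append] at ih ⊢
          rw [PySem.Chars.join_cons_cons, ih]
          simp [PySem.Chars.join_cons_cons, List.append_assoc]

lemma str_join_append_singleton (sep y : String) (xs : List String) :
    PySem.Str.join sep (xs ++ [y]) = (if xs.isEmpty then "" else PySem.Str.join sep xs ++ sep) ++ y := by
  apply String.toList_inj.mp
  rcases xs with _ | ⟨x, xs'⟩
  · simp [PySem.Str.toList_join]
  · simp only [List.isEmpty_cons, Bool.false_eq_true, if_false, List.cons_append,
      PySem.Str.toList_join, List.map_cons, List.map_append, List.map_nil]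
    rw [show x.toList :: (List.map String.toList xs' ++ [y.toList])
        = (x.toList :: List.map String.toList xs') ++ [y.toList] from by simp]
    rw [chars_join_append_singleton]
    simp [List.append_assoc]

-- the indexed formatting of A equals the piecewise formatting of B on equal-length lists
lemma fmt_eq (sep2 : String) : ∀ (v : List String) (c : List Int), c.length = v.length →
    (List.range c.length).map (fun (i : Nat) =>
        ((PySem.List.pyGet? v (i : Int)).getD "" ++ sep2) ++
          PySem.Int.toStr ((PySem.List.pyGet? c (i : Int)).getD 0))
      = List.zipWith (fun p x => p ++ PySem.Int.toStr x) (v.map (fun name => name ++ sep2)) c := by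
  intro v c
  induction c generalizing v with
  | nil => intro h; simp
  | cons d c' ih =>
      intro h
      cases v with
      | nil => simp at h
      | cons name v' =>
          simp only [List.length_cons, List.range_succ_eq_map, List.map_cons, List.map_map,
            List.zipWith_cons_cons]
          congr 1
          · simp
          · have := ih v' (by simpa using h)
            rw [← this]
            apply List.map_congr_left
            intro i _
            have h1 : ((i + 1 : Nat) : Int) = (i : Int) + 1 := by push_cast; ring
            simp [Function.comp, h1, PySem.List.pyGet?_cons_succ]

-- main invariant: the stack loop emits, entry by entry, the formatted cwr tuples of [lo, k];
-- each entry's depth (position of its next piece) is v.length - r, so only stacks whose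
-- entries satisfy r ≤ v.length are described (the initial stack and all its successors do)
lemma pvLoop_eq (k : Int) (v : List String) (sep sep2 : String) (pieces : List String)
    (hplen : pieces.length = v.length) :
    ∀ (stack : List (Nat × Int × List String)) (res : List String),
      (∀ e ∈ stack, e.1 ≤ v.length) →
      pvLoop k v sep sep2 pieces stack res
        = res ++ stack.flatMap (fun e =>
            (pvCwr (PySem.List.pyRange e.2.1 (k + 1) 1) e.1).map (fun c =>
              PySem.Str.join sep
                (e.2.2.reverse ++
                  List.zipWith (fun p x => p ++ PySem.Int.toStr x)
                    (pieces.drop (v.length - e.1)) c))) := by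
  intro stack res
  induction stack, res using pvLoop.induct k v sep pieces with
  | case1 res => intro _; simp [pvLoop]
  | case2 lo chain rest res ih =>
      intro hst
      simp at ih
      rw [pvLoop, ih (fun a b c hmem => hst (a, b, c) (List.mem_cons_of_mem _ hmem))]
      simp [pvCwr]
  | case3 lo chain rest res parts head last ih =>
      intro hst
      rw [pvLoop]
      simp only [parts, head, last] at ih
      simp at ih
      simp only [List.isEmpty_iff, List.reverse_eq_nil_iff]
      rw [ih (fun a b c hmem => hst (a, b, c) (List.mem_cons_of_mem _ hmem))]
      have hn : 1 ≤ v.length := by simpa using hst (1, lo, chain) (by simp)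
      have hd : v.length - 1 < pieces.length := by omega
      have hlast : PySem.List.pyGetD pieces ((v.length : Int) - 1) "" = pieces[v.length - 1] := by
        rw [show ((v.length : Int) - 1) = ((v.length - 1 : Nat) : Int) from by omega,
          PySem.List.pyGetD_natCast, List.getD_eq_getElem pieces "" hd]
      have hdrop : pieces.drop (v.length - 1) = [pieces[v.length - 1]] := by
        rw [List.drop_eq_getElem_cons hd, List.drop_eq_nil_of_le (by omega)]
      simp only [List.flatMap_cons, ← List.append_assoc]
      congr 2
      rw [pvCwr_one, List.map_map]
      apply List.map_congr_left
      intro val _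
      simp only [Function.comp, hdrop, hlast, List.zipWith_cons_cons, List.zipWith_nil_right]
      rw [str_join_append_singleton]
      simp only [List.isEmpty_iff, List.reverse_eq_nil_iff]
      split_ifs with hemp <;> simp [String.append_assoc]
  | case4 r lo chain rest res hle ih =>
      intro hst
      have hn : r + 2 ≤ v.length := by simpa using hst (r + 2, lo, chain) (by simp)
      have hd : v.length - (r + 2) < pieces.length := by omega
      have hpc : PySem.List.pyGetD pieces ((v.length : Int) - ((r : Int) + 2)) ""
          = pieces[v.length - (r + 2)] := by
        rw [show ((v.length : Int) - ((r : Int) + 2)) = ((v.length - (r + 2) : Nat) : Int) from by omega,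
          PySem.List.pyGetD_natCast, List.getD_eq_getElem pieces "" hd]
      have hdrop : pieces.drop (v.length - (r + 2))
          = pieces[v.length - (r + 2)] :: pieces.drop (v.length - (r + 1)) := by
        rw [List.drop_eq_getElem_cons hd, show v.length - (r + 2) + 1 = v.length - (r + 1) from by omega]
      rw [pvLoop, if_pos hle, ih (by
        intro e he
        simp only [List.mem_cons] at he
        rcases he with rfl | rfl | he
        · show r + 1 ≤ v.length; omega
        · show r + 2 ≤ v.length; omega
        · exact hst e (List.mem_cons_of_mem _ he))]
      have hlt : lo < k + 1 := by omega
      simp only [List.flatMap_cons]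
      rw [PySem.List.pyRange_one_cons hlt]
      conv_rhs => rw [pvCwr]
      rw [List.map_append, List.map_map]
      simp only [← List.append_assoc]
      congr 2
      congr 1
      apply List.map_congr_left
      intro c _
      simp only [Function.comp, hpc, hdrop, List.reverse_cons, List.zipWith_cons_cons,
        List.append_assoc, List.cons_append, List.nil_append]
  | case5 r lo chain rest res hle ih =>
      intro hst
      rw [pvLoop, if_neg hle, ih (fun e he => hst e (List.mem_cons_of_mem _ he))]
      have h : k + 1 ≤ lo := by omega
      simp [List.flatMap_cons, PySem.List.pyRange_one_eq_nil h, pvCwr]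

-- ===== VERDICT (by name: the statement is the Claim_ definition above) =====
theorem degree_derivative_iter_max_spec : Claim_equal_degree_derivative_iter_max := by
  intro k v sep sep2 _
  unfold Spec_degree_derivative_iter_max degree_derivative_iter_max degree_derivative_iter_max_alt
  rw [pvLoop_eq k v sep sep2 (v.map (fun name => name ++ sep2)) (by simp)
    [(v.length, 0, [])] [] (by simp)]
  simp only [List.flatMap_cons, List.flatMap_nil, List.append_nil, List.nil_append,
    List.reverse_nil, Nat.sub_self, List.drop_zero]
  apply List.map_congr_left
  intro c hc
  have hlen : c.length = v.length := pvCwr_length _ _ c hc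
  rw [fmt_eq sep2 v c hlen]
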